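-- pv_equiv track=rewrite | github.com/Rokeer/nn4nlpProject | Code/readJSON.py | convertCharPositionToWordPosition
-- ===== SOURCE A (Python) =====
-- def convertCharPositionToWordPosition(text, charPosition):
--     allWords = text.split()
--     characterCounter = 0
--     wordIndex = 0
--     for i in range(len(allWords)):
--         for j in range(0, len(allWords[i])):
--             characterCounter +=1
--         characterCounter +=1
--         if characterCounter > charPosition:
--             if wordIndex >= len(allWords):
--                 wordIndex = len(allWords) - 1
--             return wordIndex
--         else:
--             wordIndex += 1
--     return len(allWords) - 1
-- ===== SOURCE B (Python) =====
-- def convertCharPositionToWordPosition(text, charPosition):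
--     allWords = text.split()
--     boundaries = []
--     total = 0
--     for w in allWords:
--         total += len(w) + 1
--         boundaries.append(total)
--     lo, hi = 0, len(boundaries)
--     while lo < hi:
--         mid = (lo + hi) // 2
--         if boundaries[mid] <= charPosition:
--             lo = mid + 1
--         else:
--             hi = mid
--     if lo == len(allWords):
--         return len(allWords) - 1
--     return lo
-- ===== Notes on version B (the rewrite author's own statement) =====
-- stated objective: faster
-- what changed: Replaced the linear scanning accumulator loop with a prefix-sum boundary table plus a hand-written binary search (bisect_right) over it.
import Mathlib
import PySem

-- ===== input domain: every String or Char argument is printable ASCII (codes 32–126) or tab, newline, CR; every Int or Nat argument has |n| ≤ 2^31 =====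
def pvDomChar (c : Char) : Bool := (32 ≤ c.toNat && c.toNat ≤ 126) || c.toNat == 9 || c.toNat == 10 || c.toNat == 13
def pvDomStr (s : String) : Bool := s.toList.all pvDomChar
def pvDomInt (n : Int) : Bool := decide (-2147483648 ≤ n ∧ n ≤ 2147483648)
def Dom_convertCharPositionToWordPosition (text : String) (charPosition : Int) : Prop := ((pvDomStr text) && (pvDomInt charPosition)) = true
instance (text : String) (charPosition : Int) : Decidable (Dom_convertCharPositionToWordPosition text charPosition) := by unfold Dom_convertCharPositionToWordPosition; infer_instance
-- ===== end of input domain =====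

-- B replaces A's linear scanning accumulator loop with a prefix-sum boundary table and a binary search over it.

-- ===== PORT A =====
-- the 'for i in range(len(allWords))' loop, as structural recursion over the word list
def pvGoA (charPosition : Int) (n : Int) : List String → Int → Int → Int
  | [], _, _ => n - 1
  | w :: ws, characterCounter, wordIndex =>
    -- 'for j in range(0, len(allWords[i])): characterCounter += 1'
    let characterCounter := (PySem.List.pyRange 0 (PySem.Str.len w) 1).foldl (fun c _ => c + 1) characterCounter
    let characterCounter := characterCounter + 1
    if characterCounter > charPosition then
      (if wordIndex ≥ n then n - 1 else wordIndex)
    else pvGoA charPosition n ws characterCounter (wordIndex + 1)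

def convertCharPositionToWordPosition (text : String) (charPosition : Int) : Int :=
  let allWords := PySem.Str.split₀ text
  pvGoA charPosition (PySem.List.len allWords) allWords 0 0

-- ===== PORT B =====
-- the boundary-building loop of Source B (append of running totals)
def pvBounds : List String → Int → List Int
  | [], _ => []
  | w :: ws, total =>
    let total := total + PySem.Str.len w + 1
    total :: pvBounds ws total

-- the 'while lo < hi' binary-search loop of Source B
def pvBisect (bs : List Int) (cp : Int) (lo hi : Nat) : Nat :=
  if _h : lo < hi then
    let mid := (lo + hi) / 2
    if bs.getD mid 0 ≤ cp then pvBisect bs cp (mid + 1) hi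
    else pvBisect bs cp lo mid
  else lo
termination_by hi - lo
decreasing_by all_goals omega

def convertCharPositionToWordPosition_alt (text : String) (charPosition : Int) : Int :=
  let allWords := PySem.Str.split₀ text
  let boundaries := pvBounds allWords 0
  let lo := pvBisect boundaries charPosition 0 boundaries.length
  if lo = allWords.length then (allWords.length : Int) - 1 else (lo : Int)

-- ===== PRECONDITION & SPEC =====
def Spec_convertCharPositionToWordPosition (text : String) (charPosition : Int) (out : Int) : Prop := out = convertCharPositionToWordPosition_alt text charPosition
instance (text : String) (charPosition : Int) (out : Int) : Decidable (Spec_convertCharPositionToWordPosition text charPosition out) := by unfold Spec_convertCharPositionToWordPosition; infer_instance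

-- ===== CLAIM (what is proved, stated in full; the proofs are below) =====
def Claim_equal_convertCharPositionToWordPosition : Prop := ∀ (text : String) (charPosition : Int), Dom_convertCharPositionToWordPosition text charPosition → Spec_convertCharPositionToWordPosition text charPosition (convertCharPositionToWordPosition text charPosition)

-- ===== LEMMAS AND PROOFS =====

theorem pvBounds_length (ws : List String) (b : Int) : (pvBounds ws b).length = ws.length := by
  induction ws generalizing b with
  | nil => rfl
  | cons w ws ih => simp [pvBounds, ih]

theorem pvBounds_mem_gt (ws : List String) (b : Int) : ∀ x ∈ pvBounds ws b, b < x := by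
  induction ws generalizing b with
  | nil => simp [pvBounds]
  | cons w ws ih =>
    intro x hx
    simp only [pvBounds, List.mem_cons] at hx
    have hw : (0 : Int) ≤ PySem.Str.len w := by
      simp [PySem.Str.len_eq]
    rcases hx with h | h
    · omega
    · have := ih _ _ h; omega

theorem pvBounds_pairwise (ws : List String) (b : Int) : (pvBounds ws b).Pairwise (· ≤ ·) := by
  induction ws generalizing b with
  | nil => simp [pvBounds]
  | cons w ws ih =>
    simp only [pvBounds, List.pairwise_cons]
    exact ⟨fun x hx => le_of_lt (pvBounds_mem_gt ws _ x hx), ih _⟩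

theorem sorted_countP_char (cp : Int) (bs : List Int) (h : bs.Pairwise (· ≤ ·)) :
    ∀ i < bs.length, (bs.getD i 0 ≤ cp ↔ i < bs.countP (fun b => decide (b ≤ cp))) := by
  induction bs with
  | nil => intro i hi; simp at hi
  | cons b rest ih =>
    rcases List.pairwise_cons.mp h with ⟨hb, hrest⟩
    intro i hi
    by_cases hle : b ≤ cp
    · match i with
      | 0 =>
        simp only [List.getD, List.getElem?_cons_zero, Option.getD_some]
        simp [hle]
      | (j+1) =>
        simp only [List.getD, List.getElem?_cons_succ]
        have := ih hrest j (by simpa using hi)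
        simp only [List.getD] at this
        simp [hle]
        omega
    · have hall : ∀ x ∈ rest, ¬ x ≤ cp := fun x hx hxle => hle (le_trans (hb x hx) hxle)
      have hc0 : (b :: rest).countP (fun b => decide (b ≤ cp)) = 0 := by
        rw [List.countP_eq_zero]
        intro x hx
        simp only [List.mem_cons] at hx
        rcases hx with rfl | hx
        · simpa using hle
        · simpa using hall x hx
      rw [hc0]
      constructor
      · intro hg
        exfalso
        match i with
        | 0 => exact hle (by simpa using hg)
        | (j+1) =>
          simp only [List.getD, List.getElem?_cons_succ] at hg
          have hj : j < rest.length := by simpa using hi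
          have : rest.getD j 0 ∈ rest := by
            rw [List.getD_eq_getElem rest 0 hj]
            exact rest.getElem_mem hj
          exact hall _ this (by simpa [List.getD] using hg)
      · omega

theorem pvBisect_eq_countP (cp : Int) (bs : List Int) (h : bs.Pairwise (· ≤ ·)) :
    ∀ lo hi, lo ≤ bs.countP (fun b => decide (b ≤ cp)) →
      bs.countP (fun b => decide (b ≤ cp)) ≤ hi → hi ≤ bs.length →
      pvBisect bs cp lo hi = bs.countP (fun b => decide (b ≤ cp)) := by
  intro lo hi
  induction hn : hi - lo using Nat.strong_induction_on generalizing lo hi with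
  | _ n ih =>
    intro hlo hhi hlen
    rw [pvBisect]
    by_cases hlt : lo < hi
    · simp only [hlt, dif_pos]
      have hmid : (lo + hi) / 2 < bs.length := by omega
      have hch := sorted_countP_char cp bs h ((lo + hi) / 2) hmid
      by_cases hle : bs.getD ((lo + hi) / 2) 0 ≤ cp
      · simp only [hle, if_pos]
        exact ih (hi - ((lo + hi) / 2 + 1)) (by omega) _ _ rfl (by omega) hhi hlen
      · simp only [hle, if_neg, not_false_iff]
        exact ih ((lo + hi) / 2 - lo) (by omega) _ _ rfl hlo (by omega) (by omega)
    · simp only [hlt, dif_neg, not_false_iff]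
      omega

theorem foldl_add_one_pyRange (m : Int) (hm : 0 ≤ m) (cc : Int) :
    (PySem.List.pyRange 0 m 1).foldl (fun c _ => c + 1) cc = cc + m := by
  have hlen : ((PySem.List.pyRange 0 m 1).length : Int) = m := by
    rw [PySem.List.length_pyRange_one] ; omega
  have : ∀ (l : List Int) (c : Int), l.foldl (fun c _ => c + 1) c = c + l.length := by
    intro l
    induction l with
    | nil => simp
    | cons x xs ih => intro c; simp [List.foldl, ih]; omega
  rw [this]; omega

theorem pvGoA_eq_countP (cp : Int) (ws : List String) : ∀ (cc wi n : Int), wi + ws.length = n →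
    pvGoA cp n ws cc wi =
      (if ((pvBounds ws cc).countP (fun b => decide (b ≤ cp)) : Int) = ws.length
       then n - 1 else wi + (pvBounds ws cc).countP (fun b => decide (b ≤ cp))) := by
  induction ws with
  | nil => intro cc wi n hn; simp [pvGoA, pvBounds]
  | cons w ws ih =>
    intro cc wi n hn
    have hn' : wi + (ws.length : Int) + 1 = n := by
      push_cast [List.length_cons] at hn; omega
    have hw : (0 : Int) ≤ PySem.Str.len w := by simp [PySem.Str.len_eq]
    rw [pvGoA, foldl_add_one_pyRange _ hw]
    simp only [pvBounds, List.length_cons]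
    by_cases hle : cc + PySem.Str.len w + 1 ≤ cp
    · -- boundary ≤ cp: A keeps scanning; the head boundary counts
      have hgt : ¬ (cc + PySem.Str.len w + 1 > cp) := by omega
      rw [if_neg hgt]
      rw [List.countP_cons_of_pos (pa := by simpa using hle)]
      rw [ih _ (wi + 1) n (by omega)]
      by_cases hk : ((pvBounds ws (cc + PySem.Str.len w + 1)).countP (fun b => decide (b ≤ cp)) : Int) = ws.length
      · rw [if_pos hk, if_pos (by push_cast at hk ⊢; omega)]
      · rw [if_neg hk, if_neg (by push_cast at hk ⊢; omega)]
        push_cast; omega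
    · -- boundary > cp: A returns wordIndex; no later boundary can be ≤ cp
      have hgt : cc + PySem.Str.len w + 1 > cp := by omega
      rw [if_pos hgt]
      rw [List.countP_cons_of_neg (pa := by simpa using hle)]
      have hz : (pvBounds ws (cc + PySem.Str.len w + 1)).countP (fun b => decide (b ≤ cp)) = 0 := by
        rw [List.countP_eq_zero]
        intro x hx
        have := pvBounds_mem_gt ws _ x hx
        simp; omega
      rw [hz]
      have hwin : ¬ wi ≥ n := by omega
      rw [if_neg hwin, if_neg (by push_cast; omega)]
      omega

-- ===== VERDICT (by name: the statement is the Claim_ definition above) =====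
theorem convertCharPositionToWordPosition_spec : Claim_equal_convertCharPositionToWordPosition := by
  intro text cp _
  unfold Spec_convertCharPositionToWordPosition
  unfold convertCharPositionToWordPosition convertCharPositionToWordPosition_alt
  set ws := PySem.Str.split₀ text with hws
  set c := (pvBounds ws 0).countP (fun b => decide (b ≤ cp)) with hc
  have hcle : c ≤ ws.length := by
    rw [hc, ← pvBounds_length ws 0]
    exact List.countP_le_length
  have hb := pvBisect_eq_countP cp (pvBounds ws 0) (pvBounds_pairwise ws 0) 0 (pvBounds ws 0).length
    (Nat.zero_le _) List.countP_le_length (le_refl _)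
  rw [pvGoA_eq_countP cp ws 0 0 (PySem.List.len ws) (by simp [PySem.List.len])]
  simp only [← hc] at hb ⊢
  rw [hb]
  by_cases hk : c = ws.length
  · rw [if_pos (by push_cast [hk]; ring), if_pos hk]
    simp [PySem.List.len]
  · rw [if_neg (by omega), if_neg hk]
    omega
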